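-- pv_equiv track=rewrite | github.com/federicodiazgerstner/ejercicios-programacion | Ejercicios/Ejercicio 4.10.py | limpiarpalabra
-- ===== SOURCE A (Python) =====
-- def limpiarpalabra(palabra):
--     i=0
--     while i < len(palabra) and not palabra[i].isalpha():
--         i+=1
--     inicio=palabra[:i]
--     j=len(palabra)-1
--     while j>i and not palabra[j].isalpha():
--         j-=1
--     final=palabra[j+1:]
--     palabra=palabra[i:j+1]
--     return inicio, palabra, final
-- ===== SOURCE B (Python) =====
-- def limpiarpalabra(palabra):
--     idx = [k for k, c in enumerate(palabra) if c.isalpha()]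
--     if not idx:
--         return palabra, '', ''
--     i, j = idx[0], idx[-1]
--     return palabra[:i], palabra[i:j+1], palabra[j+1:]
-- ===== Notes on version B (the rewrite author's own statement) =====
-- stated objective: simpler
-- what changed: Replaces A's two inward-scanning index while-loops with a single forward pass that collects the indices of alphabetic characters and then slices at the first and last collected index.
import Mathlib
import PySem

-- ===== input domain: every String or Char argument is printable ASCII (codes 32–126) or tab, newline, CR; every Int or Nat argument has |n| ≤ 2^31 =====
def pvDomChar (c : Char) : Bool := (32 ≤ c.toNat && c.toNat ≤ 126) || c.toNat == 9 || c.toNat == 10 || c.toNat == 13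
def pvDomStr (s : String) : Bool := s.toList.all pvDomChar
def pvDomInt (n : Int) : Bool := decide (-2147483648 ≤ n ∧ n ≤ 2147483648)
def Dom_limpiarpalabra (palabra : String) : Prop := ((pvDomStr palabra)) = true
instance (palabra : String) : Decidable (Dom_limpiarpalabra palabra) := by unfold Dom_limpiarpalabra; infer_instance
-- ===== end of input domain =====

-- B replaces A's two inward-scanning index while-loops by one forward pass collecting the
-- indices of alphabetic characters, then slices at the first and last collected index (objective: simpler).

-- ===== PORT A =====
-- the first while loop: advance i while i < len and palabra[i] is not alphabetic
-- (the getD default is never read: the guard ensures i < cs.length)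
def pvLoop1 (cs : List Char) (i : Nat) : Nat :=
  if h : i < cs.length ∧ PySem.Chars.isalpha (cs.getD i 'a') = false then
    pvLoop1 cs (i + 1)
  else i
termination_by cs.length - i
decreasing_by omega

-- the second while loop: decrease j while j > i and palabra[j] is not alphabetic
-- (the getD default is never read: the guard gives i < j and j stays below cs.length at every call site)
def pvLoop2 (cs : List Char) (i j : Nat) : Nat :=
  if h : i < j ∧ PySem.Chars.isalpha (cs.getD j 'a') = false then
    pvLoop2 cs i (j - 1)
  else j
termination_by j
decreasing_by omega

-- Python's j starts at len(palabra)-1, an Int that is -1 for the empty string; there the loop body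
-- never runs and both slices are empty, exactly as with Nat j = 0 below, so the Nat port is value-exact.
def limpiarpalabra (palabra : String) : String × String × String :=
  let cs := palabra.toList
  let i := pvLoop1 cs 0
  let inicio := cs.take i                    -- palabra[:i], 0 ≤ i
  let j := pvLoop2 cs i (cs.length - 1)
  let fin := cs.drop (j + 1)                 -- palabra[j+1:], 0 ≤ j+1
  let core := (cs.take (j + 1)).drop i       -- palabra[i:j+1]
  (String.ofList inicio, String.ofList core, String.ofList fin)

-- ===== PORT B =====
-- idx = [k for k, c in enumerate(palabra) if c.isalpha()]  (zipIdx pairs are (char, index))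
def limpiarpalabra_alt (palabra : String) : String × String × String :=
  let cs := palabra.toList
  let idx := (cs.zipIdx.filter (fun p => PySem.Chars.isalpha p.1)).map (·.2)
  if idx.isEmpty then (String.ofList cs, "", "")
  else
    let i := idx.headD 0                     -- idx[0]
    let j := idx.getLastD 0                  -- idx[-1]
    (String.ofList (cs.take i), String.ofList ((cs.take (j + 1)).drop i), String.ofList (cs.drop (j + 1)))

-- ===== PRECONDITION & SPEC =====
def Spec_limpiarpalabra (palabra : String) (out : String × String × String) : Prop := out = limpiarpalabra_alt palabra
instance (palabra : String) (out : String × String × String) : Decidable (Spec_limpiarpalabra palabra out) := by unfold Spec_limpiarpalabra; infer_instance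

-- ===== CLAIM (what is proved, stated in full; the proofs are below) =====
def Claim_equal_limpiarpalabra : Prop := ∀ (palabra : String), Dom_limpiarpalabra palabra → Spec_limpiarpalabra palabra (limpiarpalabra palabra)

-- ===== LEMMAS AND PROOFS =====

-- "r is the last alphabetic position of cs"
def pvIsLast (cs : List Char) (r : Nat) : Prop :=
  r < cs.length ∧ PySem.Chars.isalpha (cs.getD r 'a') = true ∧
    ∀ k, r < k → k < cs.length → PySem.Chars.isalpha (cs.getD k 'a') = false

theorem pvIsLast_unique {cs : List Char} {r₁ r₂ : Nat}
    (h₁ : pvIsLast cs r₁) (h₂ : pvIsLast cs r₂) : r₁ = r₂ := by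
  obtain ⟨hl₁, ha₁, hn₁⟩ := h₁
  obtain ⟨hl₂, ha₂, hn₂⟩ := h₂
  rcases Nat.lt_trichotomy r₁ r₂ with h | h | h
  · exact absurd ((hn₁ r₂ h hl₂).symm.trans ha₂) (by decide)
  · exact h
  · exact absurd ((hn₂ r₁ h hl₁).symm.trans ha₁) (by decide)

theorem pvLoop1_eq_findIdx (cs : List Char) (i : Nat) :
    pvLoop1 cs i = i + List.findIdx (fun c => PySem.Chars.isalpha c) (cs.drop i) := by
  induction i using pvLoop1.induct cs with
  | case1 i h ih =>
    rw [pvLoop1, dif_pos h, ih, List.drop_eq_getElem_cons h.1, List.findIdx_cons]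
    rw [List.getD_eq_getElem cs 'a' h.1] at h
    simp [h.2]
    omega
  | case2 i h =>
    rw [pvLoop1, dif_neg h]
    by_cases hl : i < cs.length
    · have hp : PySem.Chars.isalpha cs[i] = true := by
        rcases Bool.eq_false_or_eq_true (PySem.Chars.isalpha cs[i]) with h1 | h2
        · exact h1
        · exact absurd ⟨hl, by rw [List.getD_eq_getElem cs 'a' hl]; exact h2⟩ h
      rw [List.drop_eq_getElem_cons hl, List.findIdx_cons, hp]
      simp
    · rw [List.drop_eq_nil_of_le (by omega)]
      simp

theorem pvLoop2_isLast (cs : List Char) (i : Nat) (hi : i < cs.length)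
    (hai : PySem.Chars.isalpha (cs.getD i 'a') = true) :
    ∀ j, i ≤ j → j < cs.length →
      (∀ k, j < k → k < cs.length → PySem.Chars.isalpha (cs.getD k 'a') = false) →
      pvIsLast cs (pvLoop2 cs i j) := by
  intro j
  induction j using pvLoop2.induct cs i with
  | case1 j h ih =>
    intro hij hjl hinv
    rw [pvLoop2, dif_pos h]
    refine ih (by omega) (by omega) ?_
    intro k hk hkl
    by_cases hkj : k = j
    · subst hkj; exact h.2
    · exact hinv k (by omega) hkl
  | case2 j h =>
    intro hij hjl hinv
    rw [pvLoop2, dif_neg h]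
    by_cases hij' : i < j
    · have hp : PySem.Chars.isalpha (cs.getD j 'a') = true := by
        rcases Bool.eq_false_or_eq_true (PySem.Chars.isalpha (cs.getD j 'a')) with h1 | h2
        · exact h1
        · exact absurd ⟨hij', h2⟩ h
      exact ⟨hjl, hp, hinv⟩
    · have hji : j = i := by omega
      subst hji
      exact ⟨hjl, hai, hinv⟩

-- B's index list, with a general zipIdx offset
theorem pvIdx_eq_nil_iff (cs : List Char) (n : Nat) :
    ((cs.zipIdx n).filter (fun p => PySem.Chars.isalpha p.1)).map (·.2) = [] ↔
      ∀ c ∈ cs, PySem.Chars.isalpha c = false := by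
  induction cs generalizing n with
  | nil => simp
  | cons c t ih =>
    rw [List.zipIdx_cons, List.filter_cons]
    by_cases hc : PySem.Chars.isalpha c = true
    · simp [hc]
    · simp only [Bool.not_eq_true] at hc
      simp [hc, ih (n + 1)]

theorem pvIdx_headD (cs : List Char) (n d : Nat)
    (h : cs.any (fun c => PySem.Chars.isalpha c) = true) :
    (((cs.zipIdx n).filter (fun p => PySem.Chars.isalpha p.1)).map (·.2)).headD d =
      n + List.findIdx (fun c => PySem.Chars.isalpha c) cs := by
  induction cs generalizing n with
  | nil => simp at h
  | cons c t ih =>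
    rw [List.zipIdx_cons, List.filter_cons, List.findIdx_cons]
    by_cases hc : PySem.Chars.isalpha c = true
    · simp [hc]
    · simp only [Bool.not_eq_true] at hc
      have ht : t.any (fun c => PySem.Chars.isalpha c) = true := by simpa [hc] using h
      rw [if_neg (by simp [hc]), ih (n + 1) ht, hc]
      simp
      omega

def pvLastPos : List Char → Nat
  | [] => 0
  | _ :: t => if t.any (fun c => PySem.Chars.isalpha c) then pvLastPos t + 1 else 0

theorem pvIdx_getLastD (cs : List Char) (n d : Nat)
    (h : cs.any (fun c => PySem.Chars.isalpha c) = true) :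
    (((cs.zipIdx n).filter (fun p => PySem.Chars.isalpha p.1)).map (·.2)).getLastD d =
      n + pvLastPos cs := by
  induction cs generalizing n d with
  | nil => simp at h
  | cons c t ih =>
    rw [List.zipIdx_cons, List.filter_cons, pvLastPos]
    by_cases ht : t.any (fun c => PySem.Chars.isalpha c) = true
    · rw [if_pos ht]
      by_cases hc : PySem.Chars.isalpha c = true
      · rw [if_pos (by simp [hc]), List.map_cons, List.getLastD_cons, ih (n + 1) n ht]
        omega
      · simp only [Bool.not_eq_true] at hc
        rw [if_neg (by simp [hc]), ih (n + 1) d ht]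
        omega
    · simp only [Bool.not_eq_true] at ht
      have hc : PySem.Chars.isalpha c = true := by simpa [ht] using h
      have hnil := (pvIdx_eq_nil_iff t (n + 1)).mpr (fun x hx => by
        simpa using List.any_eq_false.mp ht x hx)
      have h1 : ¬ ((t.any fun c => PySem.Chars.isalpha c) = true) := by simp [ht]
      rw [if_neg h1, if_pos (show PySem.Chars.isalpha (c, n).1 = true from hc), List.map_cons,
        List.getLastD_cons, hnil]
      simp

theorem pvLastPos_isLast (cs : List Char)
    (h : cs.any (fun c => PySem.Chars.isalpha c) = true) :
    pvIsLast cs (pvLastPos cs) := by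
  induction cs with
  | nil => simp at h
  | cons c t ih =>
    rw [pvLastPos]
    by_cases ht : t.any (fun c => PySem.Chars.isalpha c) = true
    · obtain ⟨l1, l2, l3⟩ := ih ht
      rw [if_pos ht]
      refine ⟨by simp; omega, by simpa [List.getD_cons_succ] using l2, ?_⟩
      intro k hk hkl
      match k, hk with
      | k + 1, hk =>
        rw [List.getD_cons_succ]
        exact l3 k (by omega) (by simpa using hkl)
    · simp only [Bool.not_eq_true] at ht
      have hc : PySem.Chars.isalpha c = true := by simpa [ht] using h
      rw [if_neg (by simp [ht])]
      refine ⟨by simp, by simpa [List.getD_cons_zero] using hc, ?_⟩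
      intro k hk hkl
      match k, hk with
      | k + 1, hk =>
        rw [List.getD_cons_succ]
        have hkt : k < t.length := by simpa using hkl
        rw [List.getD_eq_getElem t 'a' hkt]
        simpa using List.any_eq_false.mp ht _ (List.getElem_mem hkt)

-- ===== VERDICT (by name: the statement is the Claim_ definition above) =====
theorem limpiarpalabra_spec : Claim_equal_limpiarpalabra := by
  intro palabra _
  unfold Spec_limpiarpalabra limpiarpalabra limpiarpalabra_alt
  simp only []
  set cs := palabra.toList with hcs
  by_cases h : cs.any (fun c => PySem.Chars.isalpha c) = true
  · -- there is an alphabetic character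
    have hne : ¬ (((cs.zipIdx.filter (fun p => PySem.Chars.isalpha p.1)).map (·.2)).isEmpty = true) := by
      rw [List.isEmpty_iff]
      intro hnil
      obtain ⟨x, hx, hpx⟩ := List.any_eq_true.mp h
      exact absurd hpx (by simpa using (pvIdx_eq_nil_iff cs 0).mp hnil x hx)
    rw [if_neg hne]
    have hi : pvLoop1 cs 0 = List.findIdx (fun c => PySem.Chars.isalpha c) cs := by
      simpa using pvLoop1_eq_findIdx cs 0
    have hiB : ((cs.zipIdx.filter (fun p => PySem.Chars.isalpha p.1)).map (·.2)).headD 0 =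
        List.findIdx (fun c => PySem.Chars.isalpha c) cs := by
      simpa using pvIdx_headD cs 0 0 h
    have hflt : List.findIdx (fun c => PySem.Chars.isalpha c) cs < cs.length :=
      List.findIdx_lt_length.mpr (List.any_eq_true.mp h)
    have hfp : PySem.Chars.isalpha (cs.getD (List.findIdx (fun c => PySem.Chars.isalpha c) cs) 'a') = true := by
      rw [List.getD_eq_getElem cs 'a' hflt]
      exact List.findIdx_getElem
    have hA2 := pvLoop2_isLast cs _ hflt hfp (cs.length - 1) (by omega) (by omega)
      (fun k hk hkl => absurd hkl (by omega))
    have hB2 := pvLastPos_isLast cs h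
    have hjB : ((cs.zipIdx.filter (fun p => PySem.Chars.isalpha p.1)).map (·.2)).getLastD 0 =
        pvLastPos cs := by
      simpa using pvIdx_getLastD cs 0 0 h
    have hj : pvLoop2 cs (List.findIdx (fun c => PySem.Chars.isalpha c) cs) (cs.length - 1) =
        pvLastPos cs := pvIsLast_unique hA2 hB2
    rw [hi, hj, hiB, hjB]
  · -- no alphabetic character at all
    have hall : ∀ c ∈ cs, PySem.Chars.isalpha c = false := by
      intro c hc
      rcases Bool.eq_false_or_eq_true (PySem.Chars.isalpha c) with h1 | h2
      · exact absurd (List.any_eq_true.mpr ⟨c, hc, h1⟩) h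
      · exact h2
    have hnil : ((cs.zipIdx.filter (fun p => PySem.Chars.isalpha p.1)).map (·.2)) = [] :=
      (pvIdx_eq_nil_iff cs 0).mpr hall
    rw [if_pos (List.isEmpty_iff.mpr hnil)]
    have hi : pvLoop1 cs 0 = cs.length := by
      rw [pvLoop1_eq_findIdx cs 0]
      simpa using List.findIdx_eq_length.mpr hall
    have hj : pvLoop2 cs cs.length (cs.length - 1) = cs.length - 1 := by
      rw [pvLoop2, dif_neg]
      rintro ⟨h1, -⟩
      omega
    rw [hi, hj, List.take_length,
      List.drop_eq_nil_of_le (show (List.take (cs.length - 1 + 1) cs).length ≤ cs.length by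
        rw [List.length_take]; omega),
      List.drop_eq_nil_of_le (show cs.length ≤ cs.length - 1 + 1 by omega)]
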